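-- pv_equiv track=rewrite | github.com/FrancescoPaterna/Google_FooBar2023 | Level 1 - 1__The Cake is not a Lie!/solution_lv1.py | solution
-- ===== SOURCE A (Python) =====
-- def solution(string):
--     flag = len(string)
--     divisori = []
--     divisori = divisor(flag)
--     for char in string:
--         if char != string[0]:
--             return master_controller(divisori, string, flag)
--     return flag
--
-- def divisor(flag):
--     dlist = [1]
--     for i in range(2, flag + 1):
--         if flag % i == 0:
--             dlist.append(i)
--     dlist.pop()
--     return dlist
--
-- def find_num_substrings(string, substring):
--     indices = []
--     i = 0
--     counter = 0
--     # Use a while loop to keep searching for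
--     # the substring in the string.
--     while i < len(string):
--         # Use the find() method to find the first
--         # occurrence of the substring in the string
--         j = string.find(substring, i)
--         # If find() returns -1, it means that there
--         # are no more occurrences of the substring in
--         # the string, so break out of the loop.
--         if j == -1:
--             break
--         counter += 1
--         i = j + len(substring)
--     # Return the list of indices.
--     return counter
--
-- def master_controller(divisori, stringa, flag):
--     final_value = 0
--     for i in divisori:
--         k = flag // i
--         if (find_num_substrings(stringa, stringa[0:k]) == i):
--             final_value = i
--     return final_value
-- ===== SOURCE B (Python) =====
-- def solution(string):
--     n = len(string)
--     if n == 0: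
--         return 0
--     for k in range(1, n + 1):
--         if n % k == 0 and string[:k] * (n // k) == string:
--             return n // k
-- ===== Notes on version B (the rewrite author's own statement) =====
-- stated objective: simpler
-- what changed: B replaces A's divisor-list build plus greedy find()-based substring counting over all proper divisors (keeping the last match) by a single ascending scan for the smallest tiling period k dividing n, checked by direct string replication, returning n//k at the first hit.
import Mathlib
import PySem

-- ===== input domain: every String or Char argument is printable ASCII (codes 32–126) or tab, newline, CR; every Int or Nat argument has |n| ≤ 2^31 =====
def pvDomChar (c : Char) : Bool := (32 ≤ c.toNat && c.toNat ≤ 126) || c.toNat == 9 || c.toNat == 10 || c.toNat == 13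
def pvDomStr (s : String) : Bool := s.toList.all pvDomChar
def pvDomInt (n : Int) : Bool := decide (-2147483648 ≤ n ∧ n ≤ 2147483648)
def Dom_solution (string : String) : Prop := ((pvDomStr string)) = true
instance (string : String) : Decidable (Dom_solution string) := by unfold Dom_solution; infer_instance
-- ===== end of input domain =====

-- B is a simpler re-implementation: one ascending scan for the smallest tiling period k dividing n
-- (checked by direct string replication, early exit) instead of A's divisor list + greedy find()-based
-- counting over every proper divisor keeping the last match. Equivalence of the RETURN value is proved.

-- ===== PORT A =====
-- divisor(flag): collect [1] ++ divisors in [2..flag], then .pop() the last (the list is never empty)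
def divisorA (flag : Int) : List Int :=
  let dlist := (PySem.List.pyRange 2 (flag + 1) 1).foldl
      (fun dl i => if PySem.Int.mod flag i = 0 then dl ++ [i] else dl) [1]
  dlist.dropLast

-- the while-loop of find_num_substrings; state = (fuel, i, counter); i is Python's int i,
-- which stays a nonnegative index here (it starts at 0 and find() results are ≥ i when ≠ -1).
-- fuel = len(string)+1 suffices: every call site passes a nonempty substring, so i grows each round.
def findCount (s sub : List Char) : Nat → Nat → Nat → Nat
  | 0, _, counter => counter
  | fuel + 1, i, counter =>
    if i < s.length then
      let j := PySem.Chars.findFrom s sub (i : Int)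
      if j = -1 then counter
      else findCount s sub fuel (j.toNat + sub.length) (counter + 1)
    else counter

def findNumSubstrings (s sub : List Char) : Nat :=
  findCount s sub (s.length + 1) 0 0

def masterController (divisori : List Int) (stringa : List Char) (flag : Int) : Int :=
  divisori.foldl (fun final_value i =>
    let k := PySem.Int.floordiv flag i
    if (findNumSubstrings stringa (PySem.List.slice stringa (some 0) (some k)) : Int) = i then i
    else final_value) 0

-- 'for char in string: if char != string[0]: return master_controller(...)' ; after the loop: flag
def solLoopA (divisori : List Int) (s : List Char) (flag : Int) (c0 : Char) : List Char → Int
  | [] => flag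
  | c :: rest =>
    if c ≠ c0 then masterController divisori s flag else solLoopA divisori s flag c0 rest

def solution (string : String) : Int :=
  let s := string.toList
  let flag : Int := s.length
  let divisori := divisorA flag
  match s with
  | [] => flag                     -- empty loop, string[0] never read
  | c0 :: _ => solLoopA divisori s flag c0 s

-- ===== PORT B =====
-- 'for k in range(1, n+1): if n % k == 0 and string[:k] * (n // k) == string: return n // k'
def altLoop (s : List Char) (n : Nat) (k : Nat) : Int :=
  if k ≤ n then
    if n % k = 0 ∧ PySem.List.pyRepeat (PySem.List.slice s none (some (k : Int))) ((n / k : Nat) : Int) = s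
    then ((n / k : Nat) : Int)
    else altLoop s n (k + 1)
  else 0                           -- never reached when 1 ≤ k and n = len(s) ≥ 1 (k = n always succeeds)
termination_by n + 1 - k
decreasing_by omega

def solution_alt (string : String) : Int :=
  let s := string.toList
  let n := s.length
  if n = 0 then 0 else altLoop s n 1

-- ===== PRECONDITION & SPEC =====
def Spec_solution (string : String) (out : Int) : Prop := out = solution_alt string
instance (string : String) (out : Int) : Decidable (Spec_solution string out) := by unfold Spec_solution; infer_instance

-- ===== CLAIM (what is proved, stated in full; the proofs are below) =====
def Claim_equal_solution : Prop := ∀ (string : String), Dom_solution string → Spec_solution string (solution string)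

-- ===== LEMMAS AND PROOFS =====

-- the tiling predicate: s is t copies of its length-k prefix
abbrev Tiles (s : List Char) (t k : Nat) : Prop :=
  (List.replicate t (s.take k)).flatten = s

-- the minimal-period search predicate of B
abbrev Q (s : List Char) (k : Nat) : Prop :=
  0 < k ∧ k ∣ s.length ∧ Tiles s (s.length / k) k

lemma q_top {s : List Char} (h : s ≠ []) : Q s s.length := by
  refine ⟨List.length_pos_of_ne_nil h, dvd_refl _, ?_⟩
  simp [Tiles, Nat.div_self (List.length_pos_of_ne_nil h)]

lemma findFrom_self {s sub : List Char} {pos : Nat} (hpos : pos ≤ s.length)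
    (h : sub <+: s.drop pos) : PySem.Chars.findFrom s sub (pos : Int) = (pos : Int) := by
  have hne : PySem.Chars.findFrom s sub (pos : Int) ≠ -1 := by
    intro hc
    exact ((PySem.Chars.findFrom_natCast_eq_neg_one_iff s sub pos hpos).mp hc) h.isInfix
  obtain ⟨hge, hpre, hmin⟩ := PySem.Chars.findFrom_natCast_spec s sub pos hpos hne
  set j := PySem.Chars.findFrom s sub (pos : Int) with hj
  have h0 : (0 : Int) ≤ j := le_trans (by exact_mod_cast Nat.zero_le pos) hge
  have h1 : ¬ pos < j.toNat := fun hlt => hmin pos (le_refl _) hlt h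
  have h2 : (pos : Int) ≤ j := hge
  omega

lemma counter_le_findCount (s sub : List Char) : ∀ fuel i counter,
    counter ≤ findCount s sub fuel i counter := by
  intro fuel
  induction fuel with
  | zero => intro i c; simp [findCount]
  | succ fuel ih =>
    intro i c
    simp only [findCount]
    split
    · split
      · exact le_refl _
      · exact le_trans (Nat.le_succ c) (ih _ _)
    · exact le_refl _

lemma findCount_of_tiled (s sub : List Char) (hsub : sub ≠ []) :
    ∀ t fuel pos counter, pos ≤ s.length → s.drop pos = (List.replicate t sub).flatten →
    t ≤ fuel → findCount s sub fuel pos counter = counter + t := by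
  intro t
  induction t with
  | zero =>
    intro fuel pos counter hpos hdrop _
    have hlen : s.length ≤ pos := by
      simpa using List.drop_eq_nil_iff.mp (by simpa using hdrop)
    cases fuel with
    | zero => simp [findCount]
    | succ fuel => simp [findCount, Nat.not_lt.mpr hlen]
  | succ t ih =>
    intro fuel pos counter hpos hdrop hfuel
    cases fuel with
    | zero => omega
    | succ fuel =>
      have hdrop' : s.drop pos = sub ++ (List.replicate t sub).flatten := by
        simpa [List.replicate_succ] using hdrop
      have hpre : sub <+: s.drop pos := ⟨_, hdrop'.symm⟩
      have hposlt : pos < s.length := by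
        have : s.drop pos ≠ [] := by
          rw [hdrop']; simp [hsub]
        have := List.drop_eq_nil_iff.not.mp (by simpa using this)
        omega
      have hfind := findFrom_self hpos hpre
      have hnext : s.drop (pos + sub.length) = (List.replicate t sub).flatten := by
        rw [← List.drop_drop, hdrop']
        simp
      have hposlen : pos + sub.length ≤ s.length := by
        have h1 : (s.drop pos).length = s.length - pos := by simp
        have h2 : (s.drop pos).length = sub.length + ((List.replicate t sub).flatten).length := by
          rw [hdrop']; simp
        omega
      simp only [findCount, if_pos hposlt, hfind]
      have hne : ¬ ((pos : Int) = -1) := by omega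
      rw [if_neg hne]
      have : ((pos : Int)).toNat = pos := Int.toNat_natCast pos
      rw [this]
      rw [ih fuel (pos + sub.length) (counter + 1) hposlen hnext (by omega)]
      omega

lemma findCount_le (s sub : List Char) (hsub : sub ≠ []) :
    ∀ fuel pos counter t, pos ≤ s.length →
    findCount s sub fuel pos counter = counter + t →
    pos + t * sub.length ≤ s.length := by
  intro fuel
  induction fuel with
  | zero =>
    intro pos counter t hpos h
    simp [findCount] at h
    have ht : t = 0 := by omega
    subst ht
    simpa using hpos
  | succ fuel ih =>
    intro pos counter t hpos h
    simp only [findCount] at h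
    by_cases hlt : pos < s.length
    · rw [if_pos hlt] at h
      by_cases hneg : PySem.Chars.findFrom s sub (pos : Int) = -1
      · rw [if_pos hneg] at h
        have ht : t = 0 := by omega
        subst ht
        simpa using hpos
      · rw [if_neg hneg] at h
        obtain ⟨hge, hpre, _⟩ := PySem.Chars.findFrom_natCast_spec s sub pos (le_of_lt hlt) hneg
        generalize hgen : (PySem.Chars.findFrom s sub (pos : Int)).toNat = jn at h hpre
        have hposj : pos ≤ jn := by
          rw [← hgen]
          simpa using Int.toNat_le_toNat hge
        have hjk : jn + sub.length ≤ s.length := by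
          have hsl : 0 < sub.length := List.length_pos_of_ne_nil hsub
          have hl := hpre.length_le
          simp at hl
          omega
        have ht1 : 1 ≤ t := by
          have hc := counter_le_findCount s sub fuel (jn + sub.length) (counter + 1)
          rw [h] at hc
          omega
        obtain ⟨u, rfl⟩ : ∃ u, t = u + 1 := ⟨t - 1, by omega⟩
        have hrec : findCount s sub fuel (jn + sub.length) (counter + 1) = (counter + 1) + u := by
          omega
        have hih := ih (jn + sub.length) (counter + 1) u hjk hrec
        have hexp : (u + 1) * sub.length = u * sub.length + sub.length := by ring
        omega
    · rw [if_neg hlt] at h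
      have ht : t = 0 := by omega
      subst ht
      simpa using hpos

lemma findCount_exact (s sub : List Char) (hsub : sub ≠ []) :
    ∀ t fuel pos counter, pos ≤ s.length → pos + t * sub.length = s.length →
    findCount s sub fuel pos counter = counter + t →
    s.drop pos = (List.replicate t sub).flatten := by
  intro t
  induction t with
  | zero =>
    intro fuel pos counter hpos hlen _
    simp at hlen
    rw [List.replicate_zero, List.flatten_nil]
    exact List.drop_eq_nil_iff.mpr (by omega)
  | succ t ih =>
    intro fuel pos counter hpos hlen h
    have hsublen : 0 < sub.length := List.length_pos_of_ne_nil hsub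
    have hposlt : pos < s.length := by
      have : (t + 1) * sub.length = t * sub.length + sub.length := by ring
      omega
    cases fuel with
    | zero =>
      simp [findCount] at h
    | succ fuel =>
      simp only [findCount, if_pos hposlt] at h
      by_cases hneg : PySem.Chars.findFrom s sub (pos : Int) = -1
      · rw [if_pos hneg] at h; omega
      · rw [if_neg hneg] at h
        obtain ⟨hge, hpre, _⟩ := PySem.Chars.findFrom_natCast_spec s sub pos (le_of_lt hposlt) hneg
        generalize hgen : (PySem.Chars.findFrom s sub (pos : Int)).toNat = jn at h hpre
        have hposj : pos ≤ jn := by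
          rw [← hgen]
          simpa using Int.toNat_le_toNat hge
        have hjk : jn + sub.length ≤ s.length := by
          have hl := hpre.length_le
          simp at hl
          omega
        have hrec : findCount s sub fuel (jn + sub.length) (counter + 1) = (counter + 1) + t := by
          omega
        have hle := findCount_le s sub hsub fuel (jn + sub.length) (counter + 1) t hjk hrec
        have hexp : (t + 1) * sub.length = t * sub.length + sub.length := by ring
        have hjpos : jn = pos := by omega
        rw [hjpos] at hrec hpre
        have hnext := ih fuel (pos + sub.length) (counter + 1) (by omega) (by omega) hrec
        obtain ⟨r, hr⟩ := hpre
        have hrdrop : (s.drop pos).drop sub.length = r := by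
          rw [← hr]; simp
        rw [List.drop_drop] at hrdrop
        rw [List.replicate_succ, List.flatten_cons, ← hr, ← hrdrop, hnext]

-- the condition tested by master_controller, characterised as tiling
lemma findNum_eq_iff (s : List Char) (k t : Nat) (hk : 0 < k) (hkl : k ≤ s.length)
    (ht : t * k = s.length) :
    findNumSubstrings s (s.take k) = t ↔ Tiles s t k := by
  have hlen : (s.take k).length = k := by simp [hkl]
  have hne : s.take k ≠ [] := by
    intro hc
    have := congrArg List.length hc
    rw [hlen] at this
    simp at this
    omega
  constructor
  · intro h
    have h' : findCount s (s.take k) (s.length + 1) 0 0 = 0 + t := by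
      simpa [findNumSubstrings] using h
    have := findCount_exact s (s.take k) hne t (s.length + 1) 0 0 (Nat.zero_le _)
      (by rw [hlen]; omega) h'
    simpa [Tiles] using this.symm
  · intro h
    have htf : t ≤ s.length + 1 := by
      have : t ≤ t * k := Nat.le_mul_of_pos_right t hk
      omega
    have := findCount_of_tiled s (s.take k) hne t (s.length + 1) 0 0 (Nat.zero_le _)
      (by simpa using h.symm) htf
    simpa [findNumSubstrings] using this

-- B's loop: from any k ≤ k0 = Nat.find hQ it returns n / k0
lemma altLoop_eq (s : List Char) (hQ : ∃ k, Q s k) (hfl : Nat.find hQ ≤ s.length) :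
    ∀ d k, 0 < k → k + d = Nat.find hQ →
    altLoop s s.length k = ((s.length / Nat.find hQ : Nat) : Int) := by
  intro d
  induction d with
  | zero =>
    intro k hk0 hkd
    rw [Nat.add_zero] at hkd
    obtain ⟨hq0, hqdvd, hqt⟩ := Nat.find_spec hQ
    rw [altLoop, if_pos (hkd ▸ hfl), if_pos ?cond]
    · rw [hkd]
    case cond =>
      subst hkd
      refine ⟨Nat.dvd_iff_mod_eq_zero.mp hqdvd, ?_⟩
      rw [PySem.List.slice_to_natCast]
      have hqt' := hqt
      unfold Tiles at hqt'
      simpa [PySem.List.pyRepeat] using hqt'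
  | succ d ih =>
    intro k hk0 hkd
    have hkfind : k < Nat.find hQ := by omega
    have hnq := Nat.find_min hQ hkfind
    rw [altLoop, if_pos (by omega : k ≤ s.length), if_neg ?ncond]
    · exact ih (k + 1) (by omega) (by omega)
    case ncond =>
      rintro ⟨h1, h2⟩
      apply hnq
      refine ⟨hk0, Nat.dvd_of_mod_eq_zero h1, ?_⟩
      rw [PySem.List.slice_to_natCast] at h2
      simpa [PySem.List.pyRepeat, Tiles] using h2

-- a foldl keeping no hit returns its accumulator
lemma foldl_no_hit (p : Int → Prop) [DecidablePred p] :
    ∀ (L : List Int) (init : Int), (∀ i ∈ L, ¬ p i) →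
    L.foldl (fun a i => if p i then i else a) init = init := by
  intro L
  induction L with
  | nil => intro init _; rfl
  | cons a L ih =>
    intro init h
    simp only [List.foldl_cons]
    rw [if_neg (h a (List.mem_cons_self ..))]
    exact ih _ fun i hi => h i (List.mem_cons_of_mem _ hi)

-- a foldl keeping the last hit of p over an ascending list returns the maximal hit
lemma foldl_last_hit (p : Int → Prop) [DecidablePred p] :
    ∀ (L : List Int) (init i0 : Int), L.Pairwise (· < ·) → i0 ∈ L → p i0 →
    (∀ i ∈ L, p i → i ≤ i0) →
    L.foldl (fun a i => if p i then i else a) init = i0 := by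
  intro L
  induction L with
  | nil => intro init i0 _ h; simp at h
  | cons a L ih =>
    intro init i0 hpw hmem hp hmax
    rw [List.pairwise_cons] at hpw
    simp only [List.foldl_cons]
    rcases List.mem_cons.mp hmem with rfl | hmem'
    · rw [if_pos hp]
      apply foldl_no_hit
      intro i hi hpi
      have h1 := hmax i (List.mem_cons_of_mem _ hi) hpi
      have h2 := hpw.1 i hi
      omega
    · exact ih _ i0 hpw.2 hmem' hp (fun i hi hpi => hmax i (List.mem_cons_of_mem _ hi) hpi)

-- the divisor list of A for n ≥ 2
lemma divisorA_eq (n : Nat) (hn : 2 ≤ n) :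
    divisorA (n : Int) = 1 :: (PySem.List.pyRange 2 (n : Int) 1).filter
      (fun i => decide (PySem.Int.mod (n : Int) i = 0)) := by
  unfold divisorA
  have h2n : (2 : Int) ≤ (n : Int) := by exact_mod_cast hn
  rw [PySem.List.pyRange_one_succ_right h2n,
    List.foldl_append, PySem.List.foldl_append_ite_eq_filter, PySem.List.foldl_append_ite_eq_filter]
  have hmod : PySem.Int.mod (n : Int) (n : Int) = 0 :=
    (PySem.Int.mod_eq_zero_iff_dvd _ _).mpr dvd_rfl
  have hfn : List.filter (fun i => decide (PySem.Int.mod (n : Int) i = 0)) [(n : Int)]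
      = [(n : Int)] := by simp [hmod]
  rw [hfn, List.dropLast_concat]
  rfl

lemma mem_divisorA (n : Nat) (hn : 2 ≤ n) (i : Int) :
    i ∈ divisorA (n : Int) ↔ i = 1 ∨ (2 ≤ i ∧ i < (n : Int) ∧ i ∣ (n : Int)) := by
  rw [divisorA_eq n hn]
  simp only [List.mem_cons, List.mem_filter, PySem.List.mem_pyRange_one,
    decide_eq_true_eq, PySem.Int.mod_eq_zero_iff_dvd]
  tauto

lemma pairwise_divisorA (n : Nat) (hn : 2 ≤ n) : (divisorA (n : Int)).Pairwise (· < ·) := by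
  rw [divisorA_eq n hn, List.pairwise_cons]
  constructor
  · intro i hi
    have := (List.mem_filter.mp hi).1
    rw [PySem.List.mem_pyRange_one] at this
    omega
  · exact (PySem.List.pairwise_lt_pyRange_one 2 (n : Int)).filter _

lemma solLoopA_allEq (d : List Int) (s : List Char) (flag : Int) (c0 : Char) :
    ∀ l, (∀ c ∈ l, c = c0) → solLoopA d s flag c0 l = flag := by
  intro l h
  induction l with
  | nil => rfl
  | cons c rest ih =>
    have hc : c = c0 := h c (List.mem_cons_self ..)
    simp [solLoopA, hc, ih (fun x hx => h x (List.mem_cons_of_mem _ hx))]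

lemma solLoopA_notAllEq (d : List Int) (s : List Char) (flag : Int) (c0 : Char) :
    ∀ l, (∃ c ∈ l, c ≠ c0) → solLoopA d s flag c0 l = masterController d s flag := by
  intro l h
  induction l with
  | nil => simp at h
  | cons c rest ih =>
    by_cases hc : c = c0
    · obtain ⟨x, hx, hne⟩ := h
      rcases List.mem_cons.mp hx with rfl | hx'
      · exact absurd hc hne
      · simp [solLoopA, hc, ih ⟨x, hx', hne⟩]
    · simp [solLoopA, hc]

-- master_controller for a string of length n ≥ 2 whose minimal tiling divisor is ≥ 2
lemma master_eq (s : List Char) (hs2 : 2 ≤ s.length) (hQ : ∃ k, Q s k)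
    (hk02 : 2 ≤ Nat.find hQ) :
    masterController (divisorA (s.length : Int)) s (s.length : Int)
      = ((s.length / Nat.find hQ : Nat) : Int) := by
  obtain ⟨hq0, hqdvd, hqt⟩ := Nat.find_spec hQ
  set n := s.length with hn
  set k0 := Nat.find hQ with hk0def
  have hn0 : n ≠ 0 := by omega
  have hk0n : k0 ≤ n := Nat.le_of_dvd (by omega) hqdvd
  have hkey : ∀ m : Nat, 1 ≤ m → m ∣ n →
      (((findNumSubstrings s (PySem.List.slice s (some 0)
        (some (PySem.Int.floordiv (n : Int) (m : Int)))) : Int) = (m : Int)) ↔ Tiles s m (n / m)) := by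
    intro m hm hmd
    rw [PySem.Int.floordiv_natCast, PySem.List.slice_zero_start, PySem.List.slice_to_natCast,
      Int.natCast_inj]
    exact findNum_eq_iff s (n / m) m
      ((Nat.one_le_div_iff (by omega)).mpr (Nat.le_of_dvd (by omega) hmd))
      (Nat.div_le_self _ _) (Nat.mul_div_cancel' hmd)
  show List.foldl (fun a i => if ((findNumSubstrings s (PySem.List.slice s (some 0)
        (some (PySem.Int.floordiv (n : Int) i))) : Int) = i) then i else a) 0 (divisorA (n : Int))
      = ((n / k0 : Nat) : Int)
  apply foldl_last_hit
  · exact pairwise_divisorA n hs2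
  · rw [mem_divisorA n hs2]
    by_cases h1 : n / k0 = 1
    · left; rw [h1]; rfl
    · right
      have hge1 : 1 ≤ n / k0 := (Nat.one_le_div_iff (by omega)).mpr hk0n
      refine ⟨by exact_mod_cast (by omega : 2 ≤ n / k0), ?_, ?_⟩
      · exact_mod_cast Nat.div_lt_self (by omega) (by omega)
      · exact_mod_cast Nat.div_dvd_of_dvd hqdvd
  · rw [hkey (n / k0) ((Nat.one_le_div_iff (by omega)).mpr hk0n) (Nat.div_dvd_of_dvd hqdvd),
      Nat.div_div_self hqdvd hn0]
    exact hqt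
  · intro i hi hpi
    rw [mem_divisorA n hs2] at hi
    rcases hi with rfl | ⟨h2i, hilt, hidvd⟩
    · have : 1 ≤ n / k0 := (Nat.one_le_div_iff (by omega)).mpr hk0n
      exact_mod_cast this
    · obtain ⟨m, rfl⟩ : ∃ m : Nat, i = (m : Int) :=
        ⟨i.toNat, (Int.toNat_of_nonneg (by omega)).symm⟩
      have hm2 : 2 ≤ m := by exact_mod_cast h2i
      have hmd : m ∣ n := by exact_mod_cast hidvd
      have htl : Tiles s m (n / m) := (hkey m (by omega) hmd).mp hpi
      have hqm : Q s (n / m) := by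
        refine ⟨(Nat.one_le_div_iff (by omega)).mpr (Nat.le_of_dvd (by omega) hmd),
          Nat.div_dvd_of_dvd hmd, ?_⟩
        rw [← hn, Nat.div_div_self hmd hn0]
        exact htl
      have hk0le : k0 ≤ n / m := Nat.find_le hqm
      have : n / (n / m) ≤ n / k0 := Nat.div_le_div_left hk0le (by omega)
      rw [Nat.div_div_self hmd hn0] at this
      exact_mod_cast this

-- ===== VERDICT (by name: the statement is the Claim_ definition above) =====
theorem solution_spec : Claim_equal_solution := by
  unfold Claim_equal_solution
  intro string _
  unfold Spec_solution
  show solution string = solution_alt string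
  cases hs : string.toList with
  | nil => simp [solution, solution_alt, hs]
  | cons c0 rest =>
    have hsne : (c0 :: rest : List Char) ≠ [] := by simp
    have hQex : ∃ k, Q (c0 :: rest) k := ⟨_, q_top hsne⟩
    have hfpos : 0 < Nat.find hQex := (Nat.find_spec hQex).1
    have hfle : Nat.find hQex ≤ (c0 :: rest).length :=
      Nat.le_of_dvd (by simp) (Nat.find_spec hQex).2.1
    simp only [solution, solution_alt, hs]
    rw [if_neg (by simp : ¬ (c0 :: rest : List Char).length = 0)]
    by_cases hall : ∀ c ∈ (c0 :: rest : List Char), c = c0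
    · have hq1 : Q (c0 :: rest) 1 := by
        refine ⟨one_pos, one_dvd _, ?_⟩
        rw [Tiles, Nat.div_one, show (c0 :: rest : List Char).take 1 = [c0] from rfl,
          List.flatten_replicate_singleton]
        exact (List.eq_replicate_iff.mpr ⟨rfl, hall⟩).symm
      have hf1 : Nat.find hQex = 1 := le_antisymm (Nat.find_le hq1) hfpos
      rw [solLoopA_allEq _ _ _ _ _ hall,
        altLoop_eq (c0 :: rest) hQex hfle (Nat.find hQex - 1) 1 one_pos (by omega), hf1,
        Nat.div_one]
    · push_neg at hall
      have hrest : rest ≠ [] := by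
        intro hr
        subst hr
        obtain ⟨c, hc, hne⟩ := hall
        simp at hc
        exact hne hc
      have hn2 : 2 ≤ (c0 :: rest : List Char).length := by
        cases rest with
        | nil => exact absurd rfl hrest
        | cons _ _ => simp
      have hk02 : 2 ≤ Nat.find hQex := by
        by_contra hlt
        have hf1 : Nat.find hQex = 1 := by omega
        have hq1 := Nat.find_spec hQex
        rw [hf1] at hq1
        obtain ⟨_, _, ht⟩ := hq1
        rw [Tiles, Nat.div_one, show (c0 :: rest : List Char).take 1 = [c0] from rfl,
          List.flatten_replicate_singleton] at ht
        obtain ⟨c, hc, hne⟩ := hall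
        have := (List.eq_replicate_iff.mp ht.symm).2 c hc
        exact hne this
      rw [solLoopA_notAllEq _ _ _ _ _ hall,
        master_eq (c0 :: rest) hn2 hQex hk02,
        altLoop_eq (c0 :: rest) hQex hfle (Nat.find hQex - 1) 1 one_pos (by omega)]
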